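-- pv_equiv track=rewrite | github.com/vamsikrishh0099/Data-Structures-Algorithms | 3871-minimum-deletions-for-at-most-k-distinct-characters/minimum-deletions-for-at-most-k-distinct-characters.py | minDeletion
-- ===== SOURCE A (Python) =====
-- def minDeletion(s: str, k: int) -> int:
--
--
-- # """
-- # s = yyyzz
-- # k = 1
--
-- # mp:
-- # y --> 3
-- # z --> 2
--
-- # freq_arr of size max(freq) each index has list of chars
--
-- # start counting from left (least freq) and count how many chars are removed. do it until we reach k.
--
-- # """
--     counter = {}
--     for c in s:
--         counter[c] = counter.get(c, 0) + 1
--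
--     size = len(counter)
--     if size <= k:
--         return 0
--
--     max_freq = max(counter.values())
--
--     freq_arr =[ [] for _ in range(max_freq + 1) ]
--
--     for c, freq in counter.items():
--         freq_arr[freq].append(c)
--     ans = 0
--     for i in range(len(freq_arr)):
--         freq = i
--         chars_list = freq_arr[i]
--         for c in chars_list:
--
--             chars_to_remove = size - k
--             if chars_to_remove > 1:
--                 ans += freq
--                 size = size - 1
--                 continue
--
--             ans += freq
--             return ans
--
--     return ans
-- ===== SOURCE B (Python) =====
-- def minDeletion(s: str, k: int) -> int:
--     counter = {}
--     for c in s: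
--         counter[c] = counter.get(c, 0) + 1
--     if len(counter) <= k:
--         return 0
--     return sum(sorted(counter.values())[:len(counter) - k])
-- ===== Notes on version B (the rewrite author's own statement) =====
-- stated objective: simpler
-- what changed: B replaces A's bucket-array of char lists and one-at-a-time decrement loop with a single sort of the frequency values and a slice-sum of the smallest len(counter)-k of them.
-- crash fix: On the empty string with k < 0 A raises ValueError (max() of an empty dict's values); B returns 0, the number of deletions needed. — e.g. on minDeletion("", -1): A raises ValueError, B returns 0
import Mathlib
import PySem

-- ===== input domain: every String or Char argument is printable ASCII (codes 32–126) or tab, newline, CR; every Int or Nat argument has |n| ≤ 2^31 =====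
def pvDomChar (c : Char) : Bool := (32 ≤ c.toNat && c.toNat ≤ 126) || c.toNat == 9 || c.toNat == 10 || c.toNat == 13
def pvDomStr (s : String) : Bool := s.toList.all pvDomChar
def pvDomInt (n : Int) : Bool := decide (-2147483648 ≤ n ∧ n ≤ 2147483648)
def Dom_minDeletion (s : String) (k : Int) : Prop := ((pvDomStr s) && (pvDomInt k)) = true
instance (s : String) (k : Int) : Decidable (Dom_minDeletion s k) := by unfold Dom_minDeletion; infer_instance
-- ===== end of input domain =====

-- B replaces A's bucket-array of per-frequency char lists and one-at-a-time decrement loop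
-- with a sort of the frequency values and a slice-sum of the smallest len-k of them (objective: simpler).


-- ===== PORT A =====
-- inner 'for c in chars_list' body with its early 'return ans' (Sum.inr = returned)
def pvAInner (k i : Int) (chars : List Char) (ans size : Int) : Sum (Int × Int) Int :=
  match chars with
  | [] => Sum.inl (ans, size)
  | _ :: rest =>
    if size - k > 1 then pvAInner k i rest (ans + i) (size - 1)
    else Sum.inr (ans + i)

-- outer 'for i in range(len(freq_arr))' loop
def pvAOuter (k : Int) (buckets : List (List Char)) (i ans size : Int) : Int :=
  match buckets with
  | [] => ans
  | b :: bs =>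
    match pvAInner k i b ans size with
    | Sum.inl (ans', size') => pvAOuter k bs (i + 1) ans' size'
    | Sum.inr r => r

def minDeletion (s : String) (k : Int) : Int :=
  let counter := s.toList.foldl (fun d c => d.insert c (d.getD c 0 + 1)) PySem.Dict.empty
  let size : Int := counter.size
  if size ≤ k then 0
  else
    -- max(counter.values()) raises ValueError on an empty dict: excluded by Pre_minDeletion
    let maxFreq : Int := ((PySem.List.max? counter.values (fun v => v)).getD 0)
    -- freq_arr[freq].append(c); exact since every counter value v has 1 ≤ v ≤ maxFreq < len(freq_arr)
    let freqArr := counter.items.foldl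
      (fun arr p => arr.modify p.2.toNat (fun l => l ++ [p.1]))
      (List.replicate (maxFreq + 1).toNat [])
    pvAOuter k freqArr 0 0 size

-- ===== PORT B =====
def minDeletion_alt (s : String) (k : Int) : Int :=
  let counter := s.toList.foldl (fun d c => d.insert c (d.getD c 0 + 1)) PySem.Dict.empty
  if (counter.size : Int) ≤ k then 0
  else (PySem.List.slice (PySem.List.sorted counter.values (fun v => v) false)
          none (some ((counter.size : Int) - k))).sum

-- ===== PRECONDITION & SPEC =====
-- Pre_ excludes exactly the inputs on which A raises: the empty string with k < 0
-- (max() of the empty dict's values raises ValueError).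
def Pre_minDeletion (s : String) (k : Int) : Prop := s ≠ "" ∨ 0 ≤ k
instance (s : String) (k : Int) : Decidable (Pre_minDeletion s k) := by unfold Pre_minDeletion; infer_instance
def pvWitness_minDeletion : String × Int := ("aab", 1)

-- On the empty string with k < 0 A raises ValueError (max of an empty sequence); B returns 0.
def Raises_minDeletion (s : String) (k : Int) : Prop := s = "" ∧ k < 0
instance (s : String) (k : Int) : Decidable (Raises_minDeletion s k) := by unfold Raises_minDeletion; infer_instance
def pvRaiseWitness_minDeletion : String × Int := ("", -1)
def pvRaiseWitnessOut_minDeletion : Int := 0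

def Spec_minDeletion (s : String) (k : Int) (out : Int) : Prop := out = minDeletion_alt s k
instance (s : String) (k : Int) (out : Int) : Decidable (Spec_minDeletion s k out) := by unfold Spec_minDeletion; infer_instance

-- ===== CLAIM (what is proved, stated in full; the proofs are below) =====
def Claim_equal_minDeletion : Prop := ∀ (s : String) (k : Int), Dom_minDeletion s k → Pre_minDeletion s k → Spec_minDeletion s k (minDeletion s k)
def Claim_raises_minDeletion : Prop := (∀ (s : String) (k : Int), Dom_minDeletion s k → Raises_minDeletion s k → ¬ Pre_minDeletion s k) ∧ (Dom_minDeletion (pvRaiseWitness_minDeletion.1) (pvRaiseWitness_minDeletion.2) ∧ Raises_minDeletion (pvRaiseWitness_minDeletion.1) (pvRaiseWitness_minDeletion.2) ∧ minDeletion_alt (pvRaiseWitness_minDeletion.1) (pvRaiseWitness_minDeletion.2) = pvRaiseWitnessOut_minDeletion)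

-- ===== LEMMAS AND PROOFS =====

-- the freq values paired along A's bucket array, buckets at ascending indices starting at i
def pvFlat (buckets : List (List Char)) (i : Int) : List Int :=
  match buckets with
  | [] => []
  | b :: bs => b.map (fun _ => i) ++ pvFlat bs (i + 1)

-- A's scan over the flattened value list
def pvScan (k : Int) (vs : List Int) (ans size : Int) : Int :=
  match vs with
  | [] => ans
  | v :: rest => if size - k > 1 then pvScan k rest (ans + v) (size - 1) else ans + v

theorem pvAInner_scan (k i : Int) (b : List Char) (ans size : Int) (tail : List Int) :
    pvScan k (b.map (fun _ => i) ++ tail) ans size =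
      (match pvAInner k i b ans size with
       | .inl (a', s') => pvScan k tail a' s'
       | .inr r => r) := by
  induction b generalizing ans size with
  | nil => rfl
  | cons c rest ih =>
    simp only [List.map_cons, List.cons_append, pvScan, pvAInner]
    split_ifs with h
    · exact ih (ans + i) (size - 1)
    · rfl

theorem pvAOuter_scan (k : Int) (buckets : List (List Char)) (i ans size : Int) :
    pvAOuter k buckets i ans size = pvScan k (pvFlat buckets i) ans size := by
  induction buckets generalizing i ans size with
  | nil => rfl
  | cons b bs ih =>
    simp only [pvAOuter, pvFlat, pvAInner_scan]
    cases hb : pvAInner k i b ans size with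
    | inl p => cases p with | mk a' s' => simp [ih]
    | inr r => simp

theorem pvScan_take (k : Int) (vs : List Int) (ans size : Int) (h : 1 ≤ size - k) :
    pvScan k vs ans size = ans + (vs.take (size - k).toNat).sum := by
  induction vs generalizing ans size with
  | nil => simp [pvScan]
  | cons v rest ih =>
    simp only [pvScan]
    split_ifs with hgt
    · rw [ih (ans + v) (size - 1) (by omega)]
      have : (size - k).toNat = (size - 1 - k).toNat + 1 := by omega
      rw [this, List.take_succ_cons, List.sum_cons]
      ring
    · have : (size - k).toNat = 1 := by omega
      simp [this]

theorem pvFlat_mem_le (buckets : List (List Char)) (i x : Int) (hx : x ∈ pvFlat buckets i) : i ≤ x := by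
  induction buckets generalizing i with
  | nil => simp [pvFlat] at hx
  | cons b bs ih =>
    simp only [pvFlat, List.mem_append, List.mem_map] at hx
    rcases hx with ⟨_, _, rfl⟩ | hx
    · exact le_refl i
    · have := ih (i + 1) hx; omega

theorem pvConstPairwise (b : List Char) (i : Int) : (b.map (fun _ => i)).Pairwise (· ≤ ·) := by
  induction b with
  | nil => simp
  | cons c rest ih =>
    simp only [List.map_cons, List.pairwise_cons]
    exact ⟨fun x hx => by simp only [List.mem_map] at hx; rcases hx with ⟨_, _, rfl⟩; exact le_refl i, ih⟩

theorem pvFlat_pairwise (buckets : List (List Char)) (i : Int) : (pvFlat buckets i).Pairwise (· ≤ ·) := by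
  induction buckets generalizing i with
  | nil => exact List.Pairwise.nil
  | cons b bs ih =>
    simp only [pvFlat]
    rw [List.pairwise_append]
    refine ⟨pvConstPairwise b i, ih (i + 1), fun x hx y hy => ?_⟩
    simp only [List.mem_map] at hx
    rcases hx with ⟨_, _, rfl⟩
    have := pvFlat_mem_le bs (i + 1) y hy
    omega

-- bucket characterization: the fold over items appends each char to the bucket at its value
theorem pvBuckets_get? (items : List (Char × Int)) (arr0 : List (List Char)) (j : Nat) :
    (items.foldl (fun arr p => arr.modify p.2.toNat (fun l => l ++ [p.1])) arr0)[j]? =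
      arr0[j]?.map (· ++ (items.filter (fun p => p.2.toNat == j)).map (·.1)) := by
  induction items generalizing arr0 with
  | nil => cases h : arr0[j]? <;> simp [h]
  | cons p rest ih =>
    rw [List.foldl_cons, ih, List.getElem?_modify]
    cases h : arr0[j]? with
    | none => simp
    | some b =>
      by_cases hpj : p.2.toNat = j
      · simp [hpj]
      · simp [hpj]

theorem pvFlat_count (buckets : List (List Char)) (i x : Int) :
    (pvFlat buckets i).count x =
      if h : i ≤ x ∧ x < i + buckets.length then
        (buckets[(x - i).toNat]'(by omega)).length else 0 := by
  induction buckets generalizing i with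
  | nil => simp [pvFlat]
  | cons b bs ih =>
    simp only [pvFlat, List.count_append, List.map_const', List.count_replicate]
    rw [ih (i + 1)]
    by_cases hxi : x = i
    · have h1 : ¬ (i + 1 ≤ x ∧ x < i + 1 + (bs.length : Int)) := by omega
      have h2 : i ≤ x ∧ x < i + ((b :: bs).length : Int) := by
        simp only [List.length_cons]; push_cast; omega
      rw [dif_neg h1, dif_pos h2]
      have h0 : (x - i).toNat = 0 := by omega
      simp [hxi]
    · have hbeq : (i == x) = false := by simp; omega
      rw [hbeq]
      simp only [Bool.false_eq_true, if_false, Nat.zero_add]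
      by_cases h : i + 1 ≤ x ∧ x < i + 1 + (bs.length : Int)
      · have h2 : i ≤ x ∧ x < i + ((b :: bs).length : Int) := by
          simp only [List.length_cons]; push_cast; omega
        rw [dif_pos h, dif_pos h2]
        have hne : ¬ (x - i).toNat = 0 := by omega
        rw [List.getElem_cons, dif_neg hne]
        have hidx : (x - i).toNat - 1 = (x - (i + 1)).toNat := by omega
        rw [getElem_congr rfl hidx (by omega)]
      · have h2 : ¬ (i ≤ x ∧ x < i + ((b :: bs).length : Int)) := by
          simp only [List.length_cons]; push_cast; omega
        rw [dif_neg h, dif_neg h2]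

theorem pvSize_pos (cs : List Char) (hcs : cs ≠ []) : 1 ≤ ((PySem.Dict.counter cs).size : Int) := by
  have hsz : (PySem.Dict.counter cs).size = (PySem.Set.ofList cs).length := by
    show (PySem.Dict.counter cs).items.length = _
    rw [PySem.Dict.items_counter, List.length_map]
  rw [hsz]
  cases cs with
  | nil => exact absurd rfl hcs
  | cons c rest =>
    have hmem : c ∈ PySem.Set.ofList (c :: rest) := (PySem.Set.mem_ofList _ _).mpr (List.mem_cons_self ..)
    have := List.length_pos_of_mem hmem
    omega

theorem pvMain (cs : List Char) (k : Int)
    (hk : ¬ ((PySem.Dict.counter cs).size : Int) ≤ k)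
    (h1 : 1 ≤ ((PySem.Dict.counter cs).size : Int)) :
    pvAOuter k ((PySem.Dict.counter cs).items.foldl
        (fun arr p => arr.modify p.2.toNat (fun l => l ++ [p.1]))
        (List.replicate ((((PySem.List.max? (PySem.Dict.counter cs).values (fun v => v)).getD 0) + 1).toNat) []))
      0 0 ((PySem.Dict.counter cs).size : Int)
    = (PySem.List.slice (PySem.List.sorted (PySem.Dict.counter cs).values (fun v => v) false)
        none (some (((PySem.Dict.counter cs).size : Int) - k))).sum := by
  set d := PySem.Dict.counter cs with hd
  -- basic shape facts
  have hvals : d.values = d.items.map (·.2) := rfl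
  have hvlen : d.values.length = d.size := by rw [hvals, List.length_map]; rfl
  have hvne : d.values ≠ [] := by
    intro h
    have := hvlen
    rw [h] at this
    simp at this
    omega
  -- the maximum frequency
  obtain ⟨m, hm⟩ : ∃ m, PySem.List.max? d.values (fun v => v) = some m := by
    cases h : PySem.List.max? d.values (fun v => v) with
    | none => exact absurd ((PySem.List.max?_eq_none_iff _ _).mp h) hvne
    | some m => exact ⟨m, rfl⟩
  -- every frequency is between 1 and m
  have hpos : ∀ v ∈ d.values, 1 ≤ v := by
    intro v hv
    rw [hvals, hd, PySem.Dict.items_counter] at hv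
    simp only [List.map_map, List.mem_map] at hv
    obtain ⟨c, hc, rfl⟩ := hv
    have hcin : c ∈ cs := (PySem.Set.mem_ofList _ _).mp hc
    have : 0 < cs.count c := List.count_pos_iff.mpr hcin
    simp only [Function.comp]
    omega
  have hm1 : 1 ≤ m := hpos m (PySem.List.max?_mem hm)
  have hmax : ∀ v ∈ d.values, v ≤ m := PySem.List.max?_isMax hm
  rw [hm]
  simp only [Option.getD_some]
  set N := (m + 1).toNat with hNdef
  have hN : (N : Int) = m + 1 := by omega
  set freqArr := d.items.foldl (fun arr p => arr.modify p.2.toNat (fun l => l ++ [p.1]))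
      (List.replicate N []) with hfa
  -- snd of every item is a value
  have hsnd : ∀ p ∈ d.items, p.2 ∈ d.values := by
    intro p hp
    rw [hvals]
    exact List.mem_map.mpr ⟨p, hp, rfl⟩
  -- bucket contents
  have hget : ∀ j : Nat, freqArr[j]? =
      (List.replicate N ([] : List Char))[j]?.map
        (· ++ (d.items.filter (fun p => p.2.toNat == j)).map (·.1)) := by
    intro j
    rw [hfa]
    exact pvBuckets_get? d.items (List.replicate N []) j
  have hlen : freqArr.length = N := by
    rcases Nat.lt_or_ge freqArr.length N with h | h
    · have h1 := hget freqArr.length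
      rw [List.getElem?_eq_none (by omega)] at h1
      rw [List.getElem?_eq_getElem (by simpa using h)] at h1
      simp at h1
    · rcases Nat.eq_or_lt_of_le h with h' | h'
      · omega
      · have h1 := hget N
        rw [List.getElem?_eq_getElem h'] at h1
        rw [List.getElem?_eq_none (by simp)] at h1
        simp at h1
  -- counts agree, hence the flattened bucket list is a permutation of the values
  have hcount : ∀ x : Int, (pvFlat freqArr 0).count x = d.values.count x := by
    intro x
    rw [pvFlat_count]
    have hcv : d.values.count x = d.items.countP (fun p => p.2 == x) := by
      rw [hvals, List.count, List.countP_map]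
      rfl
    by_cases hx : 0 ≤ x ∧ x < (0 : Int) + freqArr.length
    · rw [dif_pos hx]
      have hjN : x.toNat < N := by omega
      have h1 := hget x.toNat
      rw [List.getElem?_eq_getElem (by omega), List.getElem?_eq_getElem (by simpa using hjN),
        List.getElem_replicate] at h1
      have h2 : freqArr[(x - 0).toNat]'(by omega) = (d.items.filter (fun p => p.2.toNat == x.toNat)).map (·.1) := by
        rw [getElem_congr rfl (by omega : (x - 0).toNat = x.toNat) (by omega)]
        simpa using h1
      rw [h2, List.length_map, ← List.countP_eq_length_filter, hcv]
      apply List.countP_congr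
      intro p hp
      have := hpos p.2 (hsnd p hp)
      simp only [beq_iff_eq]
      omega
    · rw [dif_neg hx, hcv]
      symm
      rw [List.countP_eq_zero]
      intro p hp
      have hp1 := hpos p.2 (hsnd p hp)
      have hp2 := hmax p.2 (hsnd p hp)
      simp only [beq_iff_eq]
      rw [hlen, hN] at hx
      omega
  have hperm : (pvFlat freqArr 0).Perm d.values := List.perm_iff_count.mpr hcount
  -- the flattened bucket list IS sorted(values)
  have hsorted : PySem.List.sorted d.values (fun v => v) false = pvFlat freqArr 0 := by
    apply PySem.List.eq_of_perm_of_pairwise_le_of_injective (fun v : Int => v) (fun a b h => h)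
    · exact (PySem.List.sorted_perm d.values (fun v => v) false).trans hperm.symm
    · exact PySem.List.sorted_pairwise d.values (fun v => v)
    · exact pvFlat_pairwise freqArr 0
  -- both sides
  rw [pvAOuter_scan, pvScan_take k _ 0 _ (by omega), hsorted]
  have hcast : (d.size : Int) - k = (((d.size : Int) - k).toNat : Int) := by omega
  rw [hcast, PySem.List.slice_to_natCast]
  simp
  congr 2
  omega

theorem minDeletion_spec : Claim_equal_minDeletion := by
  intro s k _ hpre
  unfold Spec_minDeletion minDeletion minDeletion_alt
  simp only [PySem.Dict.foldl_insert_getD_add_one_eq_counter]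
  by_cases hk : ((PySem.Dict.counter s.toList).size : Int) ≤ k
  · simp [hk]
  · simp only [if_neg hk]
    have h1 : 1 ≤ ((PySem.Dict.counter s.toList).size : Int) := by
      rcases hpre with hs | hk0
      · exact pvSize_pos s.toList (fun h => hs (String.toList_eq_nil_iff.mp h))
      · omega
    exact pvMain s.toList k hk h1

theorem minDeletion_raises : Claim_raises_minDeletion := by
  unfold Claim_raises_minDeletion
  constructor
  · intro s k _ hr hp
    rcases hr with ⟨hs, hk⟩
    rcases hp with h | h
    · exact h hs
    · omega
  · exact ⟨by decide, by decide, by decide⟩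

-- witness self-check: B's port really returns 0 on the excluded raising input (cited from minDeletion_raises)
theorem pvRaiseWitness_ok :
    minDeletion_alt pvRaiseWitness_minDeletion.1 pvRaiseWitness_minDeletion.2 = pvRaiseWitnessOut_minDeletion :=
  minDeletion_raises.2.2.2
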